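-- pv_equiv track=rewrite | github.com/vinjung/alphafolio_quant | kr/kr_alternative_matcher.py | _build_industry_index
-- ===== SOURCE A (Python) =====
-- from typing import Dict, List, Optional, Tuple
--
-- def _build_industry_index(buy_stocks: List[Dict]) -> Dict[str, List[Dict]]:
--     """Build industry -> stocks index (already sorted by score)"""
--     index = {}
--     for stock in buy_stocks:
--         industry = stock.get('industry')
--         if industry:
--             if industry not in index:
--                 index[industry] = []
--             index[industry].append(stock)
--     return index
-- ===== SOURCE B (Python) =====
-- from typing import Dict, List, Optional, Tuple
--
-- def _build_industry_index(buy_stocks: List[Dict]) -> Dict[str, List[Dict]]: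
--     """Build industry -> stocks index (already sorted by score)"""
--     industries = dict.fromkeys(
--         s.get('industry') for s in buy_stocks if s.get('industry'))
--     return {ind: [s for s in buy_stocks if s.get('industry') == ind]
--             for ind in industries}
-- ===== Notes on version B (the rewrite author's own statement) =====
-- stated objective: alternative
-- what changed: Replaces A's single-pass dict accumulation (create-or-append per stock) with a two-pass decomposition: first dedup the truthy industries in first-seen order (dict.fromkeys), then build each group with one filter comprehension over the input.
import Mathlib
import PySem

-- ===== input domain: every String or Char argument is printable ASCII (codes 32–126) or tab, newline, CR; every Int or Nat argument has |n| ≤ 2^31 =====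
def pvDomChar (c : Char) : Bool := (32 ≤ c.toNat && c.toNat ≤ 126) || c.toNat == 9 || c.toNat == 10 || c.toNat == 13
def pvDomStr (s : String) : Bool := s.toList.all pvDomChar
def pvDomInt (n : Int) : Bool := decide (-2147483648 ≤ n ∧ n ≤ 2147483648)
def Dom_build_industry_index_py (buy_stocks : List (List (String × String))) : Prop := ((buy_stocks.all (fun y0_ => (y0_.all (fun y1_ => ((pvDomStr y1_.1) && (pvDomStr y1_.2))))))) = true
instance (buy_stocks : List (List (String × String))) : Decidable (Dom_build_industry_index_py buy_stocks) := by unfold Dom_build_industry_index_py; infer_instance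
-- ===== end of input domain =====

-- B replaces A's single-pass dict accumulation by a two-pass decomposition (dedup the
-- truthy industries in first-seen order, then build each group with a filter); objective:
-- alternative structure, not speed.

-- ===== PORT A =====
def build_industry_index_py (buy_stocks : List (List (String × String))) : List (String × List (List (String × String))) :=
  (buy_stocks.foldl (fun index stock =>
      match (PySem.Dict.mk stock).get? "industry" with
      | some industry =>
          if industry ≠ "" then
            let index1 := if index.contains industry then index
                          else index.insert industry ([] : List (List (String × String)))
            index1.modify industry [] (fun v => v ++ [stock])
          else index
      | none => index)
    PySem.Dict.empty).items

-- ===== PORT B =====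
def build_industry_index_py_alt (buy_stocks : List (List (String × String))) : List (String × List (List (String × String))) :=
  let industries := PySem.List.dedup (buy_stocks.filterMap (fun s =>
      match (PySem.Dict.mk s).get? "industry" with
      | some i => if i ≠ "" then some i else none
      | none => none))
  industries.map (fun i =>
    (i, buy_stocks.filter (fun s => (PySem.Dict.mk s).get? "industry" == some i)))

-- ===== PRECONDITION & SPEC =====
def Spec_build_industry_index_py (buy_stocks : List (List (String × String))) (out : List (String × List (List (String × String)))) : Prop := out = build_industry_index_py_alt buy_stocks
instance (buy_stocks : List (List (String × String))) (out : List (String × List (List (String × String)))) : Decidable (Spec_build_industry_index_py buy_stocks out) := by unfold Spec_build_industry_index_py; infer_instance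

-- ===== CLAIM (what is proved, stated in full; the proofs are below) =====
def Claim_equal_build_industry_index_py : Prop := ∀ (buy_stocks : List (List (String × String))), Dom_build_industry_index_py buy_stocks → Spec_build_industry_index_py buy_stocks (build_industry_index_py buy_stocks)

-- ===== LEMMAS AND PROOFS =====

-- A's loop body, named for the proofs (definitionally the lambda inside port A).
def pvStep (index : PySem.Dict String (List (List (String × String)))) (stock : List (String × String)) : PySem.Dict String (List (List (String × String))) :=
  match (PySem.Dict.mk stock).get? "industry" with
  | some industry =>
      if industry ≠ "" then
        let index1 := if index.contains industry then index
                      else index.insert industry ([] : List (List (String × String)))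
        index1.modify industry [] (fun v => v ++ [stock])
      else index
  | none => index

-- the truthy industry of a stock, if any (B's generator expression, named)
def pvKeyT (s : List (String × String)) : Option String :=
  match (PySem.Dict.mk s).get? "industry" with
  | some i => if i ≠ "" then some i else none
  | none => none

-- the group of stocks whose industry is i (B's inner filter, named)
def pvGrp (i : String) (l : List (List (String × String))) : List (List (String × String)) :=
  l.filter (fun s => (PySem.Dict.mk s).get? "industry" == some i)

-- the distinct truthy industries of l that are not already in ks, in first-seen order
def pvNews (ks : List String) : List (List (String × String)) → List String
  | [] => []
  | s :: t => match pvKeyT s with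
    | some i => if ks.contains i then pvNews ks t else i :: pvNews (ks ++ [i]) t
    | none => pvNews ks t

theorem pvNews_not_mem (l : List (List (String × String))) (ks : List String) (i : String) (h : i ∈ pvNews ks l) : i ∉ ks := by
  induction l generalizing ks with
  | nil => simp [pvNews] at h
  | cons s t ih =>
    rw [pvNews] at h
    cases hk : pvKeyT s with
    | none => rw [hk] at h; exact ih ks h
    | some j =>
      rw [hk] at h
      by_cases hc : j ∈ ks
      · simp [hc] at h; exact ih ks h
      · simp [hc] at h
        rcases h with h | h
        · subst h; simpa using hc
        · have := ih _ h; intro hmem; exact this (by simp [hmem])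

theorem pvNews_ne_empty (l : List (List (String × String))) (ks : List String) (i : String) (h : i ∈ pvNews ks l) : i ≠ "" := by
  induction l generalizing ks with
  | nil => simp [pvNews] at h
  | cons s t ih =>
    rw [pvNews] at h
    cases hk : pvKeyT s with
    | none => rw [hk] at h; exact ih ks h
    | some j =>
      rw [hk] at h
      by_cases hc : j ∈ ks
      · simp [hc] at h; exact ih ks h
      · simp [hc] at h
        rcases h with h | h
        · subst h
          unfold pvKeyT at hk
          cases hg : (PySem.Dict.mk s).get? "industry" with
          | none => simp [hg] at hk
          | some v => rw [hg] at hk; by_cases hv : v = "" <;> simp [hv] at hk <;> simp [← hk, hv] at *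
        · exact ih _ h

theorem pvSet_update (l : List (List (String × String))) (ks : List String) :
    PySem.Set.update ks (l.filterMap pvKeyT) = ks ++ pvNews ks l := by
  induction l generalizing ks with
  | nil => simp [pvNews, PySem.Set.update]
  | cons s t ih =>
    rw [pvNews]
    cases hk : pvKeyT s with
    | none => simp [hk, ih]
    | some j =>
      simp only [List.filterMap_cons, hk]
      rw [PySem.Set.update, List.foldl_cons]
      by_cases hc : j ∈ ks
      · have hc' : ks.contains j = true := by simpa using hc
        simp only [hc', if_true]
        have : PySem.Set.add ks j = ks := by simp [PySem.Set.add, PySem.Set.contains, hc]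
        rw [this]; exact ih ks
      · have hc' : ks.contains j = false := by simpa using hc
        simp only [hc', Bool.false_eq_true, if_false]
        have : PySem.Set.add ks j = ks ++ [j] := by simp [PySem.Set.add, PySem.Set.contains, hc]
        rw [this]
        have := ih (ks ++ [j])
        rw [PySem.Set.update] at this
        rw [this, List.append_assoc]
        simp

theorem pvMain (l : List (List (String × String))) (d : PySem.Dict String (List (List (String × String))))
    (hnd : d.keys.Nodup) (hne : ∀ k ∈ d.keys, k ≠ "") :
    (l.foldl pvStep d).items
      = d.items.map (fun kv => (kv.1, kv.2 ++ pvGrp kv.1 l))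
        ++ (pvNews d.keys l).map (fun i => (i, pvGrp i l)) := by
  induction l generalizing d with
  | nil => simp [pvNews, pvGrp]
  | cons s t ih =>
    rw [List.foldl_cons]
    cases hg : (PySem.Dict.mk s).get? "industry" with
    | none =>
      have hstep : pvStep d s = d := by simp [pvStep, hg]
      have hkt : pvKeyT s = none := by simp [pvKeyT, hg]
      have hnews : pvNews d.keys (s :: t) = pvNews d.keys t := by simp [pvNews, hkt]
      rw [hstep, hnews, ih d hnd hne]
      congr 1
      · apply List.map_congr_left; intro kv hkv
        have : pvGrp kv.1 (s :: t) = pvGrp kv.1 t := by simp [pvGrp, hg]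
        rw [this]
      · apply List.map_congr_left; intro i hi
        have : pvGrp i (s :: t) = pvGrp i t := by simp [pvGrp, hg]
        rw [this]
    | some j =>
      by_cases hj : j = ""
      · subst hj
        have hstep : pvStep d s = d := by simp [pvStep, hg]
        have hkt : pvKeyT s = none := by simp [pvKeyT, hg]
        have hnews : pvNews d.keys (s :: t) = pvNews d.keys t := by simp [pvNews, hkt]
        rw [hstep, hnews, ih d hnd hne]
        congr 1
        · apply List.map_congr_left; intro kv hkv
          have hne1 : kv.1 ≠ "" := hne kv.1 (List.mem_map_of_mem hkv)
          have : pvGrp kv.1 (s :: t) = pvGrp kv.1 t := by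
            simp [pvGrp, hg, Ne.symm hne1]
          rw [this]
        · apply List.map_congr_left; intro i hi
          have hne1 : i ≠ "" := pvNews_ne_empty t d.keys i hi
          have : pvGrp i (s :: t) = pvGrp i t := by
            simp [pvGrp, hg, Ne.symm hne1]
          rw [this]
      · by_cases hc : d.contains j = true
        · -- existing key: entry gets s appended
          have hmem : j ∈ d.keys := (PySem.Dict.contains_iff_mem_keys d j).mp hc
          have hstep : pvStep d s = d.insert j (d.getD j [] ++ [s]) := by
            simp [pvStep, hg, hj, PySem.Dict.modify, hc]
          have hkeys : (d.insert j (d.getD j [] ++ [s])).keys = d.keys :=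
            PySem.Dict.keys_insert_of_contains d _ hc
          have hitems : (d.insert j (d.getD j [] ++ [s])).items
              = d.items.map (fun kv => if kv.1 = j then (kv.1, kv.2 ++ [s]) else kv) := by
            rw [PySem.Dict.items_insert_of_contains d _ hc]
            apply List.map_congr_left; intro kv hkv
            by_cases hkj : kv.1 = j
            · have : (j, kv.2) ∈ d.items := by rw [← hkj]; exact hkv
              have hget : d.getD j [] = kv.2 := PySem.Dict.getD_of_mem_items d this hnd []
              simp [hkj, hget]
            · simp [hkj]
          have hkt : pvKeyT s = some j := by simp [pvKeyT, hg, hj]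
          have hcl : d.keys.contains j = true := by simpa using hmem
          have hnews : pvNews d.keys (s :: t) = pvNews d.keys t := by
            simp only [pvNews, hkt, hcl, if_true]
          rw [hstep, ih _ (by rw [hkeys]; exact hnd) (by rw [hkeys]; exact hne), hkeys, hitems, List.map_map, hnews]
          congr 1
          · apply List.map_congr_left; intro kv hkv
            by_cases hkj : kv.1 = j
            · simp only [Function.comp, hkj, if_true]
              have : pvGrp j (s :: t) = s :: pvGrp j t := by simp [pvGrp, hg]
              simp [this]
            · simp only [Function.comp, if_neg hkj]
              have : pvGrp kv.1 (s :: t) = pvGrp kv.1 t := by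
                simp [pvGrp, hg, Ne.symm hkj]
              simp [this]
          · apply List.map_congr_left; intro i hi
            have hij : i ≠ j := fun h => (pvNews_not_mem t d.keys i hi) (h ▸ hmem)
            have : pvGrp i (s :: t) = pvGrp i t := by
              simp [pvGrp, hg, Ne.symm hij]
            rw [this]
        · -- fresh key: (j, [s]) appended
          have hc' : d.contains j = false := by simpa using hc
          have hnmem : j ∉ d.keys := fun h => hc ((PySem.Dict.contains_iff_mem_keys d j).mpr h)
          have hstep : pvStep d s = (d.insert j ([] : List (List (String × String)))).insert j
              (((d.insert j ([] : List (List (String × String)))).getD j []) ++ [s]) := by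
            simp [pvStep, hg, hj, PySem.Dict.modify, hc']
          have hgd : (d.insert j ([] : List (List (String × String)))).getD j [] = [] := by
            simp [PySem.Dict.getD_insert_self]
          have hc2 : (d.insert j ([] : List (List (String × String)))).contains j = true := by
            simp [PySem.Dict.contains_insert_self]
          have hnomem : ∀ p ∈ d.items, (p.1 == j) = false := by
            simpa [PySem.Dict.contains, List.any_eq_false] using hc'
          have hitems : (pvStep d s).items = d.items ++ [(j, [s])] := by
            rw [hstep, hgd, PySem.Dict.items_insert_of_contains _ _ hc2,
                PySem.Dict.items_insert_of_not_contains _ _ hc', List.map_append]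
            have h1 : d.items.map (fun p => if (p.1 == j) = true then (j, ([] : List (List (String × String))) ++ [s]) else p) = d.items := by
              conv_rhs => rw [← List.map_id d.items]
              apply List.map_congr_left; intro p hp; simp [hnomem p hp]
            rw [h1]; simp
          have hkeys : (pvStep d s).keys = d.keys ++ [j] := by
            simp [PySem.Dict.keys, hitems]
          have hnd' : (pvStep d s).keys.Nodup := by
            rw [hkeys]
            exact List.Nodup.append hnd (List.nodup_singleton j) (by simpa using hnmem)
          have hne' : ∀ k ∈ (pvStep d s).keys, k ≠ "" := by
            rw [hkeys]; intro k hk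
            rcases List.mem_append.mp hk with h | h
            · exact hne k h
            · simp at h; subst h; exact hj
          have hkt : pvKeyT s = some j := by simp [pvKeyT, hg, hj]
          have hcl : d.keys.contains j = false := by simpa using hnmem
          have hnews : pvNews d.keys (s :: t) = j :: pvNews (d.keys ++ [j]) t := by
            simp only [pvNews, hkt, hcl, Bool.false_eq_true, if_false]
          have hgrpj : pvGrp j (s :: t) = s :: pvGrp j t := by simp [pvGrp, hg]
          rw [ih (pvStep d s) hnd' hne', hitems, hkeys, hnews, List.map_append]
          simp only [List.map_cons, List.map_nil, List.append_assoc, List.cons_append, List.nil_append]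
          rw [hgrpj]
          congr 1
          · apply List.map_congr_left; intro kv hkv
            have hkj : kv.1 ≠ j := by simpa using hnomem kv hkv
            have : pvGrp kv.1 (s :: t) = pvGrp kv.1 t := by
              simp [pvGrp, hg, Ne.symm hkj]
            rw [this]
          · congr 1
            apply List.map_congr_left; intro i hi
            have hij : i ≠ j := by
              have := pvNews_not_mem t (d.keys ++ [j]) i hi
              intro h; exact this (by simp [h])
            have : pvGrp i (s :: t) = pvGrp i t := by
              simp [pvGrp, hg, Ne.symm hij]
            rw [this]

theorem build_industry_index_py_spec : Claim_equal_build_industry_index_py := by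
  intro l _
  unfold Spec_build_industry_index_py build_industry_index_py build_industry_index_py_alt
  show (l.foldl pvStep PySem.Dict.empty).items = _
  rw [pvMain l PySem.Dict.empty (by simp [PySem.Dict.empty, PySem.Dict.keys]) (by simp [PySem.Dict.empty, PySem.Dict.keys])]
  show _ = (PySem.List.dedup (l.filterMap pvKeyT)).map (fun i => (i, pvGrp i l))
  have hdd : PySem.Set.ofList (l.filterMap pvKeyT) = pvNews [] l := by
    simpa [PySem.Set.ofList, PySem.Set.update, PySem.Set.empty] using pvSet_update l []
  simp [PySem.Dict.empty, PySem.Dict.keys, PySem.List.dedup, hdd]
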